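-- pv_equiv track=rewrite | github.com/Baccussss/Generation-Texte | generation aleatoire.py | transi_markov1lettre
-- ===== SOURCE A (Python) =====
-- def transi_markov1lettre(chaine):
--     # permet de creer un dictionaire avec les caractères et le nombre d'occurences des carctères suivants
--     dico = {}
--     n = len(chaine)
--     for i in range(n-1):
--         if chaine[i] not in dico:
--
--             dico[chaine[i]] = {}
--             dico[chaine[i]][chaine[i+1]] = 1
--         else:
--             if chaine[i+1] not in dico[chaine[i]]:
--                 dico[chaine[i]][chaine[i+1]] = 1
--             else:
--                 dico[chaine[i]][chaine[i+1]] += 1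
--     return dico
-- ===== SOURCE B (Python) =====
-- def transi_markov1lettre(chaine):
--     # flat pair-count first, then regroup into the nested dict
--     flat = {}
--     for a, b in zip(chaine, chaine[1:]):
--         flat[(a, b)] = flat.get((a, b), 0) + 1
--     dico = {}
--     for (a, b), c in flat.items():
--         dico.setdefault(a, {})[b] = c
--     return dico
-- ===== Notes on version B (the rewrite author's own statement) =====
-- stated objective: alternative
-- what changed: B first builds a flat counter keyed by adjacent pairs (one pass over zip(chaine, chaine[1:])) and then reshapes that flat table into the nested dict in a second pass, instead of A's single index loop that branches on and updates a nested dict in place.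
import Mathlib
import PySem

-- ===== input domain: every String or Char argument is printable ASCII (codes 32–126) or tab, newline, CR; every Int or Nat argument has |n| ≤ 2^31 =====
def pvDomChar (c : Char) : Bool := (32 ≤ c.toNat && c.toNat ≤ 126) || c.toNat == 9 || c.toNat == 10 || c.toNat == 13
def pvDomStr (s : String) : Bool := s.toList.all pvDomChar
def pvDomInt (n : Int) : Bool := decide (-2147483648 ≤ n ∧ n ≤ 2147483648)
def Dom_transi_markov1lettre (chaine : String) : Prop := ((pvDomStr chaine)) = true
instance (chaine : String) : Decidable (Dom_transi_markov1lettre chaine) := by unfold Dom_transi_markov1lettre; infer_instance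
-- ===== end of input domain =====

-- B replaces A's single nested-dict-updating index loop by a flat pair counter followed by a regrouping pass (objective: alternative decomposition).

-- ===== PORT A =====
def transi_markov1lettre (chaine : String) : List (String × List (String × Int)) :=
  let s := chaine.toList
  let n : Int := PySem.Str.len chaine
  let dico : PySem.Dict String (PySem.Dict String Int) :=
    (PySem.List.pyRange 0 (n - 1) 1).foldl (fun dico i =>
      let a := String.ofList [PySem.List.pyGetD s i ' ']
      let b := String.ofList [PySem.List.pyGetD s (i + 1) ' ']
      if !dico.contains a then
        dico.insert a ((PySem.Dict.empty).insert b 1)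
      else
        let inner := dico.getD a PySem.Dict.empty
        if !inner.contains b then
          dico.insert a (inner.insert b 1)
        else
          dico.insert a (inner.insert b (inner.getD b 0 + 1))) PySem.Dict.empty
  dico.items.map (fun p => (p.1, p.2.items))

-- ===== PORT B =====
def transi_markov1lettre_alt (chaine : String) : List (String × List (String × Int)) :=
  let s := (chaine.toList).map (fun c => String.ofList [c])
  let pairs := s.zip (PySem.List.slice s (some 1) none)
  let flat : PySem.Dict (String × String) Int :=
    pairs.foldl (fun d p => d.insert p (d.getD p 0 + 1)) PySem.Dict.empty
  let dico : PySem.Dict String (PySem.Dict String Int) :=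
    flat.items.foldl (fun d q =>
      d.modify q.1.1 PySem.Dict.empty (fun inner => inner.insert q.1.2 q.2)) PySem.Dict.empty
  dico.items.map (fun p => (p.1, p.2.items))

-- ===== PRECONDITION & SPEC =====
def Spec_transi_markov1lettre (chaine : String) (out : List (String × List (String × Int))) : Prop := out = transi_markov1lettre_alt chaine
instance (chaine : String) (out : List (String × List (String × Int))) : Decidable (Spec_transi_markov1lettre chaine out) := by unfold Spec_transi_markov1lettre; infer_instance

-- ===== CLAIM (what is proved, stated in full; the proofs are below) =====
def Claim_equal_transi_markov1lettre : Prop := ∀ (chaine : String), Dom_transi_markov1lettre chaine → Spec_transi_markov1lettre chaine (transi_markov1lettre chaine)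

-- ===== LEMMAS AND PROOFS =====

-- generic: getD of a fold of keyed inserts whose value depends on the previous value at that key
theorem pvGetD_foldl_insert {κ ν β : Type} [BEq κ] [LawfulBEq κ] [DecidableEq κ]
    (key : β → κ) (g : β → ν → ν) (e : ν) :
    ∀ (ps : List β) (d : PySem.Dict κ ν) (a : κ),
    (ps.foldl (fun d p => d.insert (key p) (g p (d.getD (key p) e))) d).getD a e
      = (ps.filter (fun p => key p == a)).foldl (fun inn p => g p inn) (d.getD a e) := by
  intro ps
  induction ps with
  | nil => intro d a; simp
  | cons p ps ih =>
    intro d a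
    by_cases h : key p = a
    · simp only [List.foldl_cons, List.filter_cons, h, beq_self_eq_true, if_pos, ih]
      rw [PySem.Dict.getD_insert]
      simp
    · simp only [List.foldl_cons, List.filter_cons, ih]
      rw [PySem.Dict.getD_insert]
      simp [h, Ne.symm h]

theorem pvGetD_foldl_modify {κ ν β : Type} [BEq κ] [LawfulBEq κ] [DecidableEq κ]
    (key : β → κ) (g : β → ν → ν) (e : ν) :
    ∀ (ps : List β) (d : PySem.Dict κ ν) (a : κ),
    (ps.foldl (fun d p => d.modify (key p) e (g p)) d).getD a e
      = (ps.filter (fun p => key p == a)).foldl (fun inn p => g p inn) (d.getD a e) := by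
  intro ps
  induction ps with
  | nil => intro d a; simp
  | cons p ps ih =>
    intro d a
    by_cases h : key p = a
    · simp only [List.foldl_cons, List.filter_cons, h, beq_self_eq_true, if_pos, ih]
      rw [PySem.Dict.getD_modify]
      simp
    · simp only [List.foldl_cons, List.filter_cons, ih]
      rw [PySem.Dict.getD_modify]
      simp [h, Ne.symm h]

theorem pvOfList_map {α γ : Type} [BEq α] [LawfulBEq α] [BEq γ] [LawfulBEq γ]
    (f : α → γ) (ps : List α) :
    PySem.Set.ofList ((PySem.Set.ofList ps).map f) = PySem.Set.ofList (ps.map f) := by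
  induction ps using List.reverseRecOn with
  | nil => rfl
  | append_singleton ps x ih =>
    by_cases h : x ∈ ps <;>
      simp [PySem.Set.ofList_append_singleton, PySem.Set.add_eq_ite, PySem.Set.mem_ofList,
        List.map_append, h, ih, List.mem_map_of_mem]

theorem pvOfList_filter {α : Type} [BEq α] [LawfulBEq α] (q : α → Bool) (ps : List α) :
    PySem.Set.ofList (ps.filter q) = (PySem.Set.ofList ps).filter q := by
  induction ps using List.reverseRecOn with
  | nil => rfl
  | append_singleton ps x ih =>
    by_cases hq : q x <;> by_cases h : x ∈ ps <;>
      simp [List.filter_append, PySem.Set.ofList_append_singleton,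
        List.mem_filter, PySem.Set.mem_ofList, hq, h, ih]

theorem pvOfList_map_inj {α γ : Type} [BEq α] [LawfulBEq α] [BEq γ] [LawfulBEq γ]
    (f : α → γ) (l : List α) (hinj : ∀ x ∈ l, ∀ y ∈ l, f x = f y → x = y) :
    PySem.Set.ofList (l.map f) = (PySem.Set.ofList l).map f := by
  induction l using List.reverseRecOn with
  | nil => rfl
  | append_singleton l x ih =>
    have hsub : ∀ y ∈ PySem.Set.ofList l, y ∈ l := fun y hy => (PySem.Set.mem_ofList l y).1 hy
    simp only [List.map_append, List.map_cons, List.map_nil]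
    rw [PySem.Set.ofList_append_singleton, PySem.Set.ofList_append_singleton,
      PySem.Set.add_eq_ite, PySem.Set.add_eq_ite,
      ih (fun a ha b hb => hinj a (List.mem_append_left _ ha) b (List.mem_append_left _ hb))]
    by_cases h : x ∈ PySem.Set.ofList l
    · rw [if_pos h, if_pos]
      exact List.mem_map_of_mem h
    · rw [if_neg h, if_neg]
      · simp
      intro hc
      rcases List.mem_map.1 hc with ⟨y, hy, hfy⟩
      exact h (by
        have := hinj y (List.mem_append_left _ (hsub y hy)) x (by simp) hfy
        rwa [← this])

theorem pvCount (ps : List (String × String)) (a b : String) :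
    ((ps.filter (fun p => p.1 == a)).map Prod.snd).count b = ps.count (a, b) := by
  induction ps with
  | nil => rfl
  | cons p ps ih =>
    obtain ⟨x, y⟩ := p
    by_cases h1 : x = a
    · by_cases h2 : y = b <;>
        simp [h1, h2, ih, Prod.ext_iff]
    · simp [h1, ih, Prod.ext_iff]

theorem pvInnerInj (ps : List (String × String)) (a : String) :
    ∀ x ∈ (PySem.Set.ofList ps).filter (fun p => p.1 == a),
      ∀ y ∈ (PySem.Set.ofList ps).filter (fun p => p.1 == a), x.2 = y.2 → x = y := by
  intro x hx y hy hxy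
  have hx1 : x.1 = a := by simpa using (List.mem_filter.1 hx).2
  have hy1 : y.1 = a := by simpa using (List.mem_filter.1 hy).2
  exact Prod.ext (hx1.trans hy1.symm) hxy

theorem pvInner (ps : List (String × String)) (a : String) :
    PySem.Dict.counter ((ps.filter (fun p => p.1 == a)).map Prod.snd)
      = ((PySem.Set.ofList ps).filter (fun p => p.1 == a)).foldl
          (fun inn p => inn.insert p.2 ((ps.count p : Int))) PySem.Dict.empty := by
  apply PySem.Dict.ext
  have hnd : ((PySem.Set.ofList ps).filter (fun p => p.1 == a)).Nodup :=
    (PySem.Set.nodup_ofList ps).filter _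
  rw [PySem.Dict.items_counter,
    PySem.Dict.items_foldl_insert_fresh _ (fun p => p.2) (fun p => ((ps.count p : Int))) _
      (fun p _ => PySem.Dict.contains_empty _) (hnd.map_on (pvInnerInj ps a))]
  rw [pvOfList_map_inj Prod.snd (ps.filter (fun p => p.1 == a))
      (by
        intro x hx y hy hxy
        have hx1 : x.1 = a := by simpa using (List.mem_filter.1 hx).2
        have hy1 : y.1 = a := by simpa using (List.mem_filter.1 hy).2
        exact Prod.ext (hx1.trans hy1.symm) hxy),
    pvOfList_filter, List.map_map]
  simp only [PySem.Dict.empty, List.nil_append]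
  apply List.map_congr_left
  intro p hp
  have hp1 : p.1 = a := by simpa using (List.mem_filter.1 hp).2
  simp only [Function.comp]
  rw [pvCount ps a p.2]
  have : (a, p.2) = p := Prod.ext hp1.symm rfl
  rw [this]

theorem pvStepA_eq (d : PySem.Dict String (PySem.Dict String Int)) (a b : String) :
    (if !d.contains a then d.insert a ((PySem.Dict.empty).insert b 1)
     else
       let inner := d.getD a PySem.Dict.empty
       if !inner.contains b then d.insert a (inner.insert b 1)
       else d.insert a (inner.insert b (inner.getD b 0 + 1)))
      = d.insert a ((d.getD a PySem.Dict.empty).insert b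
          ((d.getD a PySem.Dict.empty).getD b 0 + 1)) := by
  by_cases h : d.contains a
  · simp only [h, Bool.not_true, Bool.false_eq_true, if_false]
    by_cases hb : (d.getD a PySem.Dict.empty).contains b
    · simp [hb]
    · have hb' : (d.getD a PySem.Dict.empty).contains b = false := by simpa using hb
      simp [hb', PySem.Dict.getD_of_not_contains _ _ hb']
  · have h' : d.contains a = false := by simpa using h
    simp [h', PySem.Dict.getD_of_not_contains _ _ h']

theorem pvMain (ps : List (String × String)) :
    ps.foldl (fun d p => d.insert p.1 ((d.getD p.1 PySem.Dict.empty).insert p.2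
        ((d.getD p.1 PySem.Dict.empty).getD p.2 (0:Int) + 1))) PySem.Dict.empty
      = (PySem.Dict.counter ps).items.foldl (fun d q =>
          d.modify q.1.1 PySem.Dict.empty (fun inner => inner.insert q.1.2 q.2))
          PySem.Dict.empty := by
  apply PySem.Dict.ext
  have hndA : (ps.foldl (fun d p => d.insert p.1 ((d.getD p.1 PySem.Dict.empty).insert p.2
      ((d.getD p.1 PySem.Dict.empty).getD p.2 (0:Int) + 1))) PySem.Dict.empty).keys.Nodup :=
    PySem.Dict.nodup_keys_foldl_insert_key ps Prod.fst _ PySem.Dict.empty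
      (by simp [PySem.Dict.keys_empty])
  have hndB : ((PySem.Dict.counter ps).items.foldl (fun d q =>
      d.modify q.1.1 PySem.Dict.empty (fun inner => inner.insert q.1.2 q.2))
      PySem.Dict.empty).keys.Nodup :=
    PySem.Dict.nodup_keys_foldl_modify_key (PySem.Dict.counter ps).items
      (fun q => q.1.1) PySem.Dict.empty (fun _ q => fun inner => inner.insert q.1.2 q.2)
      PySem.Dict.empty (by simp [PySem.Dict.keys_empty])
  rw [PySem.Dict.items_eq_map_keys _ hndA PySem.Dict.empty,
    PySem.Dict.items_eq_map_keys _ hndB PySem.Dict.empty]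
  have hkeys : (ps.foldl (fun d p => d.insert p.1 ((d.getD p.1 PySem.Dict.empty).insert p.2
        ((d.getD p.1 PySem.Dict.empty).getD p.2 (0:Int) + 1))) PySem.Dict.empty).keys
      = ((PySem.Dict.counter ps).items.foldl (fun d q =>
          d.modify q.1.1 PySem.Dict.empty (fun inner => inner.insert q.1.2 q.2))
          PySem.Dict.empty).keys := by
    have hkA : (ps.foldl (fun d p => d.insert p.1 ((d.getD p.1 PySem.Dict.empty).insert p.2
          ((d.getD p.1 PySem.Dict.empty).getD p.2 (0:Int) + 1))) PySem.Dict.empty).keys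
        = PySem.Set.update (PySem.Dict.empty :
            PySem.Dict String (PySem.Dict String Int)).keys (ps.map Prod.fst) :=
      PySem.Dict.keys_foldl_insert_key ps Prod.fst _ PySem.Dict.empty
    have hkB : ((PySem.Dict.counter ps).items.foldl (fun d q =>
          d.modify q.1.1 PySem.Dict.empty (fun inner => inner.insert q.1.2 q.2))
          PySem.Dict.empty).keys
        = PySem.Set.update (PySem.Dict.empty :
            PySem.Dict String (PySem.Dict String Int)).keys
            ((PySem.Dict.counter ps).items.map (fun q => q.1.1)) :=
      PySem.Dict.keys_foldl_modify_key (PySem.Dict.counter ps).items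
        (fun q => q.1.1) PySem.Dict.empty
        (fun _ q => fun inner => inner.insert q.1.2 q.2) PySem.Dict.empty
    rw [hkA, hkB]
    simp only [PySem.Dict.keys_empty, PySem.Set.update_nil_left, PySem.Dict.items_counter,
      List.map_map]
    rw [← pvOfList_map (fun p : String × String => p.1) ps]
    rfl
  rw [← hkeys]
  apply List.map_congr_left
  intro a _
  have hA := pvGetD_foldl_insert Prod.fst
    (fun p inn => inn.insert p.2 (inn.getD p.2 (0:Int) + 1)) PySem.Dict.empty ps PySem.Dict.empty a
  have hB := pvGetD_foldl_modify (fun q : (String × String) × Int => q.1.1)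
    (fun q inn => inn.insert q.1.2 q.2) PySem.Dict.empty
    (PySem.Dict.counter ps).items PySem.Dict.empty a
  simp only [PySem.Dict.getD_empty] at hA hB
  rw [hA, hB]
  congr 1
  have hAin : (ps.filter (fun p => p.1 == a)).foldl
      (fun inn p => inn.insert p.2 (inn.getD p.2 (0:Int) + 1)) PySem.Dict.empty
      = PySem.Dict.counter ((ps.filter (fun p => p.1 == a)).map Prod.snd) := by
    rw [← PySem.Dict.foldl_insert_getD_add_one_eq_counter, List.foldl_map]
  rw [hAin, pvInner]
  rw [PySem.Dict.items_counter, List.filter_map, List.foldl_map]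
  rfl

theorem pvZip (cs : List Char) (k : Nat) (hk : cs.length = k + 1) :
    (cs.map (fun c => String.ofList [c])).zip (cs.map (fun c => String.ofList [c])).tail
      = (List.range k).map (fun (i : Nat) =>
          (String.ofList [PySem.List.pyGetD cs (i : Int) ' '],
           String.ofList [PySem.List.pyGetD cs ((i : Int) + 1) ' '])) := by
  apply List.ext_getElem
  · simp [hk]
  · intro i h1 h2
    have hik : i < k := by simpa using h2
    have hi1 : i < cs.length := by omega
    have hi2 : i + 1 < cs.length := by omega
    have e1 : PySem.List.pyGetD cs (i : Int) ' ' = cs[i] := by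
      rw [PySem.List.pyGetD_natCast, List.getD_eq_getElem _ _ hi1]
    have e2 : PySem.List.pyGetD cs ((i : Int) + 1) ' ' = cs[i + 1] := by
      have : ((i : Int) + 1) = ((i + 1 : Nat) : Int) := by push_cast; ring
      rw [this, PySem.List.pyGetD_natCast, List.getD_eq_getElem _ _ hi2]
    simp only [List.getElem_map, List.getElem_zip, List.getElem_tail, List.getElem_range]
    rw [e1, e2]

-- ===== VERDICT (by name: the statement is the Claim_ definition above) =====
theorem transi_markov1lettre_spec : Claim_equal_transi_markov1lettre := by
  intro chaine _
  unfold Spec_transi_markov1lettre transi_markov1lettre transi_markov1lettre_alt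
  simp only [PySem.Str.len_eq, PySem.List.slice_from_one,
    PySem.Dict.foldl_insert_getD_add_one_eq_counter]
  generalize chaine.toList = cs
  rcases cs with _ | ⟨c, cs'⟩
  · decide
  · have hcast : ((List.length (c :: cs') : Int)) - 1 = ((cs'.length : Nat) : Int) := by
      push_cast [List.length_cons]; ring
    rw [hcast, PySem.List.pyRange_zero_natCast, List.foldl_map,
      pvZip (c :: cs') cs'.length rfl, ← pvMain, List.foldl_map]
    congr 2
    congr 1
    funext d i
    exact pvStepA_eq d _ _
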